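-- pv_equiv track=rewrite | github.com/webdeveloper510/travel_bot | myapp/views.py | getist
-- ===== SOURCE A (Python) =====
-- def getist(data , val):
--     unique_data={}
--     arr = [(index, arr, idx, item) for index, arr in enumerate(data) for idx, item in enumerate(val) if item in arr[:-1]]
--     getarr = [(getdata[2], getdata[1]) for getdata in arr]
--     sorted_getarr = sorted(getarr, key=lambda x: x[0])
--     if sorted_getarr:
--         for index, values in sorted_getarr:
--             if index not in unique_data:
--                 if values not in unique_data.values():
--                     unique_data[index] = values
--     result_list = list(unique_data.values())
--     return result_list
-- ===== SOURCE B (Python) =====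
-- def getist(data, val):
--     result = []
--     for item in val:
--         for arr in data:
--             if item in arr[:-1] and arr not in result:
--                 result.append(arr)
--                 break
--     return result
-- ===== Notes on version B (the rewrite author's own statement) =====
-- stated objective: simpler
-- what changed: Replaced the quadruple comprehension + projection + stable sort + dict-based dedup with a direct double loop: for each val item in order, append the first data array containing it (in arr[:-1]) that is not already in the result, and break.
import Mathlib
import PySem

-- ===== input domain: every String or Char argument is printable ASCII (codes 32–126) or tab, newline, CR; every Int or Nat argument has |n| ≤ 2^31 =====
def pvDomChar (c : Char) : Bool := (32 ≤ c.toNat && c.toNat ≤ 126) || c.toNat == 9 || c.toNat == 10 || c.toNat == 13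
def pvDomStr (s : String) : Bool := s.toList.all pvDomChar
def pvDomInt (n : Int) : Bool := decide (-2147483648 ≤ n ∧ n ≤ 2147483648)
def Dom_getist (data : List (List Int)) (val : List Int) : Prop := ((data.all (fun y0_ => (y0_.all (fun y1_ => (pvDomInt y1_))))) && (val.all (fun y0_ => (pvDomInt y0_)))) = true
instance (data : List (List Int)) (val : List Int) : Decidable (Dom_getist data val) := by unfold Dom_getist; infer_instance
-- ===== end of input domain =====

-- B replaces A's comprehension + projection + stable sort + dict dedup by a direct double loop
-- (first not-yet-used matching array per val item, in val order); objective: simpler, same results.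

-- ===== PORT A =====
def getist (data : List (List Int)) (val : List Int) : List (List Int) :=
  let unique0 : PySem.Dict Int (List Int) := PySem.Dict.empty
  let arr : List (Int × List Int × Int × Int) :=
    (PySem.List.enumerate data).flatMap (fun p =>
      ((PySem.List.enumerate val).filter
          (fun q => decide (q.2 ∈ PySem.List.slice p.2 none (some (-1))))).map
        (fun q => (p.1, p.2, q.1, q.2)))
  let getarr : List (Int × List Int) := arr.map (fun g => (g.2.2.1, g.2.1))
  let sortedGetarr := PySem.List.sorted getarr (fun x => x.1) false
  let uniqueData : PySem.Dict Int (List Int) :=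
    if sortedGetarr.isEmpty then unique0
    else
      sortedGetarr.foldl
        (fun d p =>
          if d.contains p.1 then d
          else if decide (p.2 ∈ d.values) then d
          else d.insert p.1 p.2)
        unique0
  uniqueData.values


-- ===== PORT B =====
-- inner 'for arr in data: ... break' loop of Source B
def pickArr (item : Int) (res : List (List Int)) : List (List Int) → List (List Int)
  | [] => res
  | a :: rest =>
      if item ∈ a.dropLast ∧ a ∉ res then res ++ [a]
      else pickArr item res rest

def getist_alt (data : List (List Int)) (val : List Int) : List (List Int) :=
  val.foldl (fun res item => pickArr item res data) []

-- ===== PRECONDITION & SPEC =====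
def Spec_getist (data : List (List Int)) (val : List Int) (out : List (List Int)) : Prop := out = getist_alt data val
instance (data : List (List Int)) (val : List Int) (out : List (List Int)) : Decidable (Spec_getist data val out) := by unfold Spec_getist; infer_instance

-- ===== CLAIM (what is proved, stated in full; the proofs are below) =====
def Claim_equal_getist : Prop := ∀ (data : List (List Int)) (val : List Int), Dom_getist data val → Spec_getist data val (getist data val)

-- ===== LEMMAS AND PROOFS =====

def pvGrp (n : Nat) (P : List (Int × List Int)) : List (Int × List Int) :=
  (List.range n).flatMap (fun (k : Nat) => P.filter (fun p => decide (p.1 = (k : Int))))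

theorem pv_ins_split {α : Type} (before : α → α → Bool) (x : α) (L1 L2 : List α)
    (h1 : ∀ y ∈ L1, before x y = false) (h2 : ∀ y ∈ L2, before x y = true) :
    PySem.List.insertBy before x (L1 ++ L2) = L1 ++ x :: L2 := by
  induction L1 with
  | nil =>
    cases L2 with
    | nil => simp [PySem.List.insertBy]
    | cons y t => simp [PySem.List.insertBy, h2 y (by simp)]
  | cons z t ih =>
    have hz := h1 z (by simp)
    simp [PySem.List.insertBy, hz]
    exact ih (fun y hy => h1 y (by simp [hy]))

theorem pv_ins_grp (n kn : Nat) (hk : kn < n) (p : Int × List Int) (hp : p.1 = (kn : Int))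
    (P : List (Int × List Int)) :
    PySem.List.insertBy (fun a b => decide (a.1 < b.1)) p (pvGrp n P) = pvGrp n (P ++ [p]) := by
  have hn : n = (kn + 1) + (n - (kn + 1)) := by omega
  have hsplit : List.range n = List.range (kn + 1) ++ (List.range (n - (kn + 1))).map (fun j => (kn + 1) + j) := by
    conv_lhs => rw [hn]
    exact List.range_add
  have hfil : ∀ (k : Nat), (P ++ [p]).filter (fun q => decide (q.1 = (k : Int)))
      = P.filter (fun q => decide (q.1 = (k : Int))) ++ (if k = kn then [p] else []) := by
    intro k
    rw [List.filter_append]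
    congr 1
    by_cases h : k = kn
    · subst h; simp [List.filter, hp]
    · have : ¬ (p.1 = (k : Int)) := by rw [hp]; intro hc; exact h (by exact_mod_cast hc.symm)
      simp [List.filter, this, h]
  unfold pvGrp
  rw [hsplit]
  rw [List.flatMap_append, List.flatMap_append]
  -- tail groups unchanged
  have htail : ((List.range (n - (kn + 1))).map (fun j => (kn + 1) + j)).flatMap
        (fun (k : Nat) => (P ++ [p]).filter (fun q => decide (q.1 = (k : Int))))
      = ((List.range (n - (kn + 1))).map (fun j => (kn + 1) + j)).flatMap
        (fun (k : Nat) => P.filter (fun q => decide (q.1 = (k : Int)))) := by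
    apply List.flatMap_congr
    intro k hkmem
    rw [hfil k]
    simp only [List.mem_map, List.mem_range] at hkmem
    obtain ⟨j, _, rfl⟩ := hkmem
    have : ¬ (kn + 1 + j = kn) := by omega
    simp [this]
  rw [htail]
  -- head groups: range (kn+1) = range kn ++ [kn]
  have hhead : (List.range (kn + 1)).flatMap
        (fun (k : Nat) => (P ++ [p]).filter (fun q => decide (q.1 = (k : Int))))
      = (List.range (kn + 1)).flatMap (fun (k : Nat) => P.filter (fun q => decide (q.1 = (k : Int)))) ++ [p] := by
    rw [List.range_succ, List.flatMap_append, List.flatMap_append]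
    have h1 : (List.range kn).flatMap (fun (k : Nat) => (P ++ [p]).filter (fun q => decide (q.1 = (k : Int))))
        = (List.range kn).flatMap (fun (k : Nat) => P.filter (fun q => decide (q.1 = (k : Int)))) := by
      apply List.flatMap_congr
      intro k hkmem
      rw [hfil k]
      simp only [List.mem_range] at hkmem
      have : ¬ (k = kn) := by omega
      simp [this]
    rw [h1, List.flatMap_cons, List.flatMap_cons, hfil kn]
    simp
  rw [hhead]
  -- now apply the split insertion
  rw [pv_ins_split]
  · simp
  · intro y hy
    simp only [List.mem_flatMap, List.mem_range, List.mem_filter] at hy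
    obtain ⟨k, hklt, hmem, hkey⟩ := hy
    have : y.1 = (k : Int) := by exact_mod_cast of_decide_eq_true hkey
    simp only [hp, this, decide_eq_false_iff_not, not_lt]
    exact_mod_cast Nat.le_of_lt_succ hklt
  · intro y hy
    simp only [List.mem_flatMap, List.mem_map, List.mem_range] at hy
    obtain ⟨k, ⟨j, _, rfl⟩, hmem⟩ := hy
    rw [List.mem_filter] at hmem
    have : y.1 = ((kn + 1 + j : Nat) : Int) := by exact_mod_cast of_decide_eq_true hmem.2
    simp only [hp, this, decide_eq_true_eq]
    exact_mod_cast by omega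

theorem pv_fold_ins (n : Nat) (P : List (Int × List Int))
    (h : ∀ p ∈ P, ∃ k, k < n ∧ p.1 = (k : Int)) :
    P.foldl (fun acc x => PySem.List.insertBy (fun a b => decide (a.1 < b.1)) x acc) [] = pvGrp n P := by
  induction P using List.reverseRecOn with
  | nil => simp [pvGrp]
  | append_singleton Q p ih =>
    rw [List.foldl_append, List.foldl_cons, List.foldl_nil]
    rw [ih (fun q hq => h q (by simp [hq]))]
    obtain ⟨k, hk, hp⟩ := h p (by simp)
    exact pv_ins_grp n k hk p hp Q

theorem pv_enum_key_lb {α : Type} (xs : List α) (s : Int) (q : Int × α)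
    (h : q ∈ PySem.List.enumerate xs s) : s ≤ q.1 := by
  rw [PySem.List.mem_enumerate_iff] at h
  obtain ⟨k, hk, rfl⟩ := h
  omega

theorem pv_enum_filter_single (xs : List Int) (s : Int) (k : Nat) (hk : k < xs.length)
    (c : Int × Int → Bool) :
    (PySem.List.enumerate xs s).filter (fun q => c q && decide (q.1 = s + (k : Int))) =
      if c (s + (k : Int), xs.getD k 0) then [(s + (k : Int), xs.getD k 0)] else [] := by
  induction xs generalizing s k with
  | nil => simp at hk
  | cons x t ih =>
    rw [PySem.List.enumerate_cons, List.filter_cons]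
    cases k with
    | zero =>
      have htail : (PySem.List.enumerate t (s + 1)).filter (fun q => c q && decide (q.1 = s + ((0 : Nat) : Int))) = [] := by
        rw [List.filter_eq_nil_iff]
        intro q hq
        have := pv_enum_key_lb t (s + 1) q hq
        simp only [Bool.and_eq_true, decide_eq_true_eq]
        rintro ⟨-, h2⟩
        omega
      rw [htail]
      simp [List.getD]
    | succ j =>
      have he : s + ((j + 1 : Nat) : Int) = (s + 1) + (j : Int) := by push_cast; ring
      simp only [he, List.getD_cons_succ]
      have hne2 : (decide (s = s + 1 + (j : Int))) = false := by
        simp only [decide_eq_false_iff_not]; omega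
      rw [hne2]
      simp only [Bool.and_false, Bool.false_eq_true, if_false]
      exact ih (s + 1) j (by simpa using hk)

def pvGetarr (data : List (List Int)) (val : List Int) : List (Int × List Int) :=
  data.flatMap (fun arr =>
    ((PySem.List.enumerate val).filter (fun q => decide (q.2 ∈ arr.dropLast))).map
      (fun q => (q.1, arr)))

def pvTg (data : List (List Int)) (val : List Int) (k : Nat) : List (Int × List Int) :=
  (data.filter (fun a => decide (val.getD k 0 ∈ a.dropLast))).map (fun a => ((k : Int), a))

theorem pv_enum_drop {α β : Type} (xs : List α) (s : Int) (F : α → List β) :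
    (PySem.List.enumerate xs s).flatMap (fun pr => F pr.2) = xs.flatMap F := by
  induction xs generalizing s with
  | nil => simp [PySem.List.enumerate_nil]
  | cons x t ih => simp [PySem.List.enumerate_cons, ih]

theorem pv_flatMap_if_singleton {α β : Type} (l : List α) (p : α → Bool) (f : α → β) :
    l.flatMap (fun a => if p a then [f a] else []) = (l.filter p).map f := by
  induction l with
  | nil => simp
  | cons a t ih => by_cases h : p a <;> simp [h, ih]

theorem pv_filter_flatMap {α β : Type} (l : List α) (f : α → List β) (p : β → Bool) :
    (l.flatMap f).filter p = l.flatMap (fun a => (f a).filter p) := by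
  induction l with
  | nil => simp
  | cons a t ih => simp [List.filter_append, ih]

theorem pv_keys (data : List (List Int)) (val : List Int) :
    ∀ p ∈ pvGetarr data val, ∃ k, k < val.length ∧ p.1 = (k : Int) := by
  intro p hp
  unfold pvGetarr at hp
  simp only [List.mem_flatMap, List.mem_map, List.mem_filter] at hp
  obtain ⟨arr, _, q, ⟨hq, _⟩, rfl⟩ := hp
  rw [PySem.List.mem_enumerate_iff] at hq
  obtain ⟨k, hk, rfl⟩ := hq
  exact ⟨k, hk, by simp⟩

theorem pv_grp_eq_Tg (data : List (List Int)) (val : List Int) (k : Nat) (hk : k < val.length) :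
    (pvGetarr data val).filter (fun p => decide (p.1 = (k : Int))) = pvTg data val k := by
  unfold pvGetarr pvTg
  rw [pv_filter_flatMap]
  have hper : ∀ arr : List Int,
      ((((PySem.List.enumerate val).filter (fun q => decide (q.2 ∈ arr.dropLast))).map
        (fun q => (q.1, arr))).filter (fun p => decide (p.1 = (k : Int))))
      = if decide (val.getD k 0 ∈ arr.dropLast) then [((k : Int), arr)] else [] := by
    intro arr
    rw [List.filter_map]
    simp only [Function.comp_def]
    rw [List.filter_filter]
    have hsing := pv_enum_filter_single val 0 k hk (fun q => decide (q.2 ∈ arr.dropLast))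
    simp only [zero_add] at hsing
    have hcomm : (fun a : Int × Int => decide (a.1 = (k : Int)) && decide (a.2 ∈ arr.dropLast))
        = (fun a : Int × Int => decide (a.2 ∈ arr.dropLast) && decide (a.1 = (k : Int))) :=
      funext (fun a => Bool.and_comm _ _)
    rw [hcomm, hsing]
    split <;> simp
  rw [List.flatMap_congr (fun arr _ => hper arr), pv_flatMap_if_singleton]
def pvStep (d : PySem.Dict Int (List Int)) (p : Int × List Int) : PySem.Dict Int (List Int) :=
  if d.contains p.1 then d
  else if decide (p.2 ∈ d.values) then d
  else d.insert p.1 p.2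


theorem pv_fold_skip (ms : List (Int × List Int)) (d : PySem.Dict Int (List Int))
    (h : ∀ p ∈ ms, d.contains p.1 = true) : ms.foldl pvStep d = d := by
  induction ms with
  | nil => rfl
  | cons p t ih =>
    have hp := h p (by simp)
    simp only [List.foldl_cons, pvStep, hp, if_true]
    exact ih (fun q hq => h q (by simp [hq]))

theorem pv_grp_fold (s x : Int) (l : List (List Int)) (d : PySem.Dict Int (List Int))
    (hs : d.contains s = false) :
    (((l.filter (fun a => decide (x ∈ a.dropLast))).map (fun a => (s, a))).foldl pvStep d).values
        = pickArr x d.values l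
      ∧ ∀ j : Int, (((l.filter (fun a => decide (x ∈ a.dropLast))).map (fun a => (s, a))).foldl pvStep d).contains j = true
        → j = s ∨ d.contains j = true := by
  induction l generalizing d with
  | nil => exact ⟨rfl, fun j hj => Or.inr hj⟩
  | cons a t ih =>
    by_cases hpa : x ∈ a.dropLast
    · by_cases hmem : a ∈ d.values
      · -- matching but already used: step is identity
        have : pvStep d (s, a) = d := by simp [pvStep, hs, hmem]
        simp only [List.filter_cons, hpa, decide_true, if_true, List.map_cons, List.foldl_cons, this]
        obtain ⟨h1, h2⟩ := ih d hs
        refine ⟨?_, h2⟩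
        rw [h1, pickArr]
        simp [hpa, hmem]
      · -- fresh match: insert, then the rest of the group is skipped
        have hstep : pvStep d (s, a) = d.insert s a := by simp [pvStep, hs, hmem]
        have hcontains : (d.insert s a).contains s = true := PySem.Dict.contains_insert_self d s a
        have hskip : ((t.filter (fun a => decide (x ∈ a.dropLast))).map (fun a => (s, a))).foldl pvStep (d.insert s a) = d.insert s a := by
          apply pv_fold_skip
          intro p hp
          simp only [List.mem_map] at hp
          obtain ⟨b, _, rfl⟩ := hp
          exact hcontains
        simp only [List.filter_cons, hpa, decide_true, if_true, List.map_cons, List.foldl_cons, hstep, hskip]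
        constructor
        · rw [pickArr]
          simp only [hpa, hmem, not_false_iff, and_true, if_true]
          simp [PySem.Dict.values, PySem.Dict.items_insert_of_not_contains d a hs]
        · intro j hj
          rw [PySem.Dict.contains_insert] at hj
          rcases Bool.or_eq_true_iff.mp hj with h | h
          · left; exact (beq_iff_eq.mp h)
          · right; exact h
    · -- non-matching array: both sides skip it
      simp only [List.filter_cons, hpa, decide_false, Bool.false_eq_true, if_false]
      obtain ⟨h1, h2⟩ := ih d hs
      refine ⟨?_, h2⟩
      rw [h1, pickArr]
      simp [hpa]

theorem pv_dict_loop (data : List (List Int)) (val : List Int) :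
    ∀ (m s : Nat) (d : PySem.Dict Int (List Int)),
      s + m = val.length →
      (∀ j : Int, d.contains j = true → j < (s : Int)) →
      ((((List.range m).map (fun j => s + j)).flatMap (fun k => pvTg data val k)).foldl pvStep d).values
        = (val.drop s).foldl (fun res item => pickArr item res data) d.values := by
  intro m
  induction m with
  | zero =>
    intro s d hlen _
    have hs : s = val.length := by omega
    simp [hs]
  | succ m ih =>
    intro s d hlen hinv
    have hlen' : (s + 1) + m = val.length := by omega
    have hslt : s < val.length := by omega
    have hrange : (List.range (m + 1)).map (fun j => s + j)
        = s :: (List.range m).map (fun j => (s + 1) + j) := by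
      rw [List.range_succ_eq_map, List.map_cons, List.map_map]
      congr 1
      apply List.map_congr_left
      intro j _
      simp only [Function.comp_apply]
      omega
    rw [hrange, List.flatMap_cons, List.foldl_append]
    have hcont : d.contains (s : Int) = false := by
      cases hc : d.contains (s : Int) with
      | false => rfl
      | true => exact absurd (hinv _ hc) (by omega)
    have hgf := pv_grp_fold (s : Int) (val.getD s 0) data d hcont
    have hgf1 : (List.foldl pvStep d (pvTg data val s)).values
        = pickArr (val.getD s 0) d.values data := hgf.1
    have hgf2 : ∀ j : Int, (List.foldl pvStep d (pvTg data val s)).contains j = true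
        → j < ((s + 1 : Nat) : Int) := by
      intro j hj
      rcases hgf.2 j hj with h | h
      · subst h; push_cast; omega
      · have := hinv j h; push_cast; omega
    rw [ih (s + 1) _ hlen' hgf2, hgf1]
    rw [List.drop_eq_getElem_cons hslt, List.foldl_cons, List.getD_eq_getElem val 0 hslt]


theorem pv_final (data : List (List Int)) (val : List Int) : getist data val = getist_alt data val := by
  unfold getist getist_alt
  simp only [PySem.List.slice_to_neg_one, List.map_flatMap, List.map_map, Function.comp_def]
  rw [pv_enum_drop data 0 (fun arr =>
    ((PySem.List.enumerate val).filter (fun q => decide (q.2 ∈ arr.dropLast))).map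
      (fun q => (q.1, arr)))]
  rw [PySem.List.sorted_eq_foldl_insertBy]
  have hG : (List.flatMap (fun arr => List.map (fun q => (q.1, arr))
      (List.filter (fun q => decide (q.2 ∈ arr.dropLast)) (PySem.List.enumerate val))) data)
      = pvGetarr data val := rfl
  rw [hG]
  have hstep : (fun (d : PySem.Dict Int (List Int)) (p : Int × List Int) =>
      if d.contains p.1 = true then d else if decide (p.2 ∈ d.values) = true then d
      else d.insert p.1 p.2) = pvStep := rfl
  rw [hstep]
  rw [pv_fold_ins val.length (pvGetarr data val) (pv_keys data val)]
  have hif : (if (pvGrp val.length (pvGetarr data val)).isEmpty = true then (PySem.Dict.empty : PySem.Dict Int (List Int))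
      else List.foldl pvStep PySem.Dict.empty (pvGrp val.length (pvGetarr data val)))
      = List.foldl pvStep PySem.Dict.empty (pvGrp val.length (pvGetarr data val)) := by
    by_cases hL : (pvGrp val.length (pvGetarr data val)).isEmpty = true
    · rw [if_pos hL, List.isEmpty_iff.mp hL, List.foldl_nil]
    · rw [if_neg hL]
  rw [hif]
  have hgrp : pvGrp val.length (pvGetarr data val) = (List.range val.length).flatMap (fun k => pvTg data val k) := by
    unfold pvGrp
    exact List.flatMap_congr (fun k hk => pv_grp_eq_Tg data val k (List.mem_range.mp hk))
  have hloop := pv_dict_loop data val val.length 0 PySem.Dict.empty (by omega)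
    (by intro j hj; simp [PySem.Dict.contains_empty] at hj)
  have hmap : (List.range val.length).map (fun j : Nat => 0 + j) = List.range val.length := by simp
  rw [hmap] at hloop
  rw [← hgrp] at hloop
  simp only [List.drop_zero] at hloop
  exact hloop

-- ===== VERDICT (by name: the statement is the Claim_ definition above) =====
theorem getist_spec : Claim_equal_getist := by
  intro data val _
  exact pv_final data val
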